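-- pv_equiv track=rewrite | github.com/StephenAlanBuckley/Genetics | genetics_class.py | create_base_pool
-- ===== SOURCE A (Python) =====
-- def create_base_pool(base):
-- 	base_pool = ['0', '1']
-- 	if base > 36:
-- 		base = 36
--
-- 	for x in range(2,base):
-- 		if x < 10:
-- 			base_pool.append(str(x))
-- 		else:
-- 			base_pool.append(chr(55+x))
-- 	return base_pool
-- ===== SOURCE B (Python) =====
-- DIGITS = '0123456789ABCDEFGHIJKLMNOPQRSTUVWXYZ'
--
-- def create_base_pool(base):
--     n = max(2, min(base, 36))
--     return list(DIGITS[:n])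
-- ===== Notes on version B (the rewrite author's own statement) =====
-- stated objective: simpler
-- what changed: B replaces the loop that synthesizes digit characters one by one (str(x) / chr(55+x)) with a slice of a precomputed digit table of length max(2, min(base, 36)).
import Mathlib
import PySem

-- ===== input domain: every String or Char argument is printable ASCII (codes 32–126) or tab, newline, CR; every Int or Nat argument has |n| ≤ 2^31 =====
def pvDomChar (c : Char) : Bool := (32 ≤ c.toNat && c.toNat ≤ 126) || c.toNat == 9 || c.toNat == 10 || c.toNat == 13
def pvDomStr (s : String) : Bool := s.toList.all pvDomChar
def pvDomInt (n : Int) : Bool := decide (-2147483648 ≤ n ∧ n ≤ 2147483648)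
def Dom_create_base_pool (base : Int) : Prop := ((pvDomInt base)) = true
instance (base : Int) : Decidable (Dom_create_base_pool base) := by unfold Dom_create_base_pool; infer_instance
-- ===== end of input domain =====

-- B replaces A's per-character synthesis loop with a slice of a precomputed digit table (simpler).

-- ===== PORT A =====
-- chr(55+x) is ported as Char.ofNat (55+x).toNat; exact here since the loop only reaches it for 10 ≤ x.
def create_base_pool (base : Int) : List String :=
  (PySem.List.pyRange 2 (if base > 36 then 36 else base) 1).foldl
    (fun acc x =>
      if x < 10 then acc ++ [PySem.Int.toStr x]
      else acc ++ [String.ofList [Char.ofNat (55 + x).toNat]])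
    ["0", "1"]

-- ===== PORT B =====
def pvDIGITS : List String :=
  ["0","1","2","3","4","5","6","7","8","9","A","B","C","D","E","F","G","H","I",
   "J","K","L","M","N","O","P","Q","R","S","T","U","V","W","X","Y","Z"]

def create_base_pool_alt (base : Int) : List String :=
  pvDIGITS.take (max 2 (min base 36)).toNat

-- ===== PRECONDITION & SPEC =====
def Spec_create_base_pool (base : Int) (out : List String) : Prop := out = create_base_pool_alt base
instance (base : Int) (out : List String) : Decidable (Spec_create_base_pool base out) := by unfold Spec_create_base_pool; infer_instance

-- ===== CLAIM (what is proved, stated in full; the proofs are below) =====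
def Claim_equal_create_base_pool : Prop := ∀ (base : Int), Dom_create_base_pool base → Spec_create_base_pool base (create_base_pool base)

-- ===== LEMMAS AND PROOFS =====

-- ===== VERDICT (by name: the statement is the Claim_ definition above) =====
theorem create_base_pool_spec : Claim_equal_create_base_pool := by
  intro base _
  unfold Spec_create_base_pool create_base_pool create_base_pool_alt
  by_cases h : base > 36
  · rw [if_pos h, min_eq_right (le_of_lt h), max_eq_right (by norm_num : (2:Int) ≤ 36)]
    decide
  · push Not at h
    rw [if_neg (not_lt.mpr h), min_eq_left h]
    by_cases h2 : base ≤ 2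
    · rw [PySem.List.pyRange_one_eq_nil h2, max_eq_left h2]
      decide
    · push Not at h2
      rw [max_eq_right (le_of_lt h2)]
      interval_cases base <;> decide
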